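-- pv_equiv track=rewrite | github.com/miragellm/MIRAGE | ImperfectManual/envs/cuterpg/NavigationMap/observation.py | get_first_person
-- ===== SOURCE A (Python) =====
-- def get_first_person(pos, direction, map_data, season, MAP_ROWS, MAP_COLS, TILE_SIZE):
--     (x, y) = pos
--     agent_tile_x = x // TILE_SIZE
--     agent_tile_y = y // TILE_SIZE
--
--     start_x = (agent_tile_x - 1) * TILE_SIZE
--     start_y = (agent_tile_y - 1) * TILE_SIZE
--     end_x = (agent_tile_x + 2) * TILE_SIZE
--     end_y = (agent_tile_y + 2) * TILE_SIZE
--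
--     observation = []
--
--     for ny in range(start_y, end_y):
--         row = []
--         for nx in range(start_x, end_x):
--             if 0 <= nx < MAP_COLS * TILE_SIZE and 0 <= ny < MAP_ROWS * TILE_SIZE:
--                 if x-1<=nx<=x+1 and y-1<=ny<=y+1:
--                     row.append('agent')
--                 else:
--                     row.append(map_data[season][ny][nx])
--             else:
--                 row.append("void")
--         observation.append(row)
--
--
--     if direction == 'east':
--         observation = [list(row) for row in zip(*observation)][::-1]
--     elif direction == 'west':
--         observation = [list(row) for row in zip(*observation[::-1])]
--     elif direction == 'south':
--         observation = [row[::-1] for row in observation[::-1]]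
--
--     return observation
-- ===== SOURCE B (Python) =====
-- def get_first_person(pos, direction, map_data, season, MAP_ROWS, MAP_COLS, TILE_SIZE):
--     x, y = pos
--     t = TILE_SIZE
--     start_x = (x // t - 1) * t
--     start_y = (y // t - 1) * t
--     n = 3 * t
--
--     def cell(wx, wy):
--         nx, ny = start_x + wx, start_y + wy
--         if not (0 <= nx < MAP_COLS * t and 0 <= ny < MAP_ROWS * t):
--             return "void"
--         if x - 1 <= nx <= x + 1 and y - 1 <= ny <= y + 1:
--             return 'agent'
--         return map_data[season][ny][nx]
--
--     if direction == 'east':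
--         src = lambda i, j: (n - 1 - i, j)
--     elif direction == 'west':
--         src = lambda i, j: (i, n - 1 - j)
--     elif direction == 'south':
--         src = lambda i, j: (n - 1 - j, n - 1 - i)
--     else:
--         src = lambda i, j: (j, i)
--
--     return [[cell(*src(i, j)) for j in range(n)] for i in range(n)]
-- ===== Notes on version B (the rewrite author's own statement) =====
-- stated objective: alternative
-- what changed: B eliminates A's build-then-reorient step (zip(*...) transpose plus list reversals): for the chosen direction it precomputes an output-to-window index transform and fills the already-oriented grid cell by cell in one nested comprehension.
import Mathlib
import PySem

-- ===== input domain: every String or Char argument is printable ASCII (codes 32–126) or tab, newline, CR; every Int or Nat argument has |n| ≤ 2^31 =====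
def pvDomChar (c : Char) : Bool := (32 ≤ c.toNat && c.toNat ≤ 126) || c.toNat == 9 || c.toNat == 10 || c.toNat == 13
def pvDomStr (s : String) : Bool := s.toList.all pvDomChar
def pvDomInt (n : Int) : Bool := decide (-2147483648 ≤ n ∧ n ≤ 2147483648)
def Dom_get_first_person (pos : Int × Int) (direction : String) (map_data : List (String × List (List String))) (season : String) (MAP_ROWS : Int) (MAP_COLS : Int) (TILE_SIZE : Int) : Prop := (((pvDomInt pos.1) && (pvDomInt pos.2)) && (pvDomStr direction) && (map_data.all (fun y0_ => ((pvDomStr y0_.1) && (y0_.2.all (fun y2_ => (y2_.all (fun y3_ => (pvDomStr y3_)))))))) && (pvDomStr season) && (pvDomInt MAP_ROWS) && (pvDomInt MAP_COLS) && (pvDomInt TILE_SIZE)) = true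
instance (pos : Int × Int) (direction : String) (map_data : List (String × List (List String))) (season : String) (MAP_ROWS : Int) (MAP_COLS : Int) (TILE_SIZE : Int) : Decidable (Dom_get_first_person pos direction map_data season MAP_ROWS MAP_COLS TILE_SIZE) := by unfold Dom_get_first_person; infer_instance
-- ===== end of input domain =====

-- B replaces A's build-then-reorient step (zip(*...) transpose plus reversals) by a per-direction
-- output-to-window index transform and fills the oriented grid directly ("alternative"; same cost).

-- ===== PORT A =====
-- A's inner loop body: bounds check first, then agent check, else map lookup (exact branch order of A)
def pvCellA (x y MAP_COLS MAP_ROWS T : Int) (map_data : List (String × List (List String))) (season : String) (nx ny : Int) : String :=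
  if 0 ≤ nx ∧ nx < MAP_COLS * T ∧ 0 ≤ ny ∧ ny < MAP_ROWS * T then
    if x - 1 ≤ nx ∧ nx ≤ x + 1 ∧ y - 1 ≤ ny ∧ ny ≤ y + 1 then "agent"
    else (PySem.List.pyGet? ((PySem.List.pyGet? ((List.lookup season map_data).getD []) ny).getD []) nx).getD ""
  else "void"

-- Python's zip(*rows) (as lists): truncates at the shortest row, [] when rows = []
def pvZipT (rows : List (List String)) : List (List String) :=
  if h : rows = [] ∨ rows.any List.isEmpty then []
  else (rows.map fun r => r.headD "") :: pvZipT (rows.map List.tail)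
termination_by (rows.map List.length).sum
decreasing_by
  have hne : rows ≠ [] := fun hc => h (Or.inl hc)
  have hall : rows.any List.isEmpty = false := by
    cases hany : rows.any List.isEmpty
    · rfl
    · exact absurd (Or.inr hany) h
  rw [List.any_eq_false] at hall
  have key : (rows.map (fun r => r.tail.length)).sum < (rows.map List.length).sum := by
    refine List.sum_lt_sum _ _ (fun r _ => by simp [List.length_tail]) ?_
    obtain ⟨r, hr⟩ := List.exists_mem_of_ne_nil rows hne
    have hrne : r ≠ [] := by simpa [List.isEmpty_iff] using hall r hr
    have hrpos : 0 < r.length := List.length_pos_of_ne_nil hrne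
    exact ⟨r, hr, by simp [List.length_tail]; omega⟩
  simpa [Function.comp_def, List.length_tail] using key

def get_first_person (pos : Int × Int) (direction : String) (map_data : List (String × List (List String))) (season : String) (MAP_ROWS : Int) (MAP_COLS : Int) (TILE_SIZE : Int) : List (List String) :=
  let x := pos.1
  let y := pos.2
  let agent_tile_x := PySem.Int.floordiv x TILE_SIZE
  let agent_tile_y := PySem.Int.floordiv y TILE_SIZE
  let start_x := (agent_tile_x - 1) * TILE_SIZE
  let start_y := (agent_tile_y - 1) * TILE_SIZE
  let end_x := (agent_tile_x + 2) * TILE_SIZE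
  let end_y := (agent_tile_y + 2) * TILE_SIZE
  let observation := (PySem.List.pyRange start_y end_y 1).map (fun ny =>
    (PySem.List.pyRange start_x end_x 1).map (fun nx =>
      pvCellA x y MAP_COLS MAP_ROWS TILE_SIZE map_data season nx ny))
  if direction = "east" then (pvZipT observation).reverse
  else if direction = "west" then pvZipT observation.reverse
  else if direction = "south" then (observation.reverse).map List.reverse
  else observation

-- ===== PORT B =====
-- B's cell classifier: void first (early return), then agent, else map lookup (exact branch order of B)
def pvCellB (x y MAP_COLS MAP_ROWS T : Int) (map_data : List (String × List (List String))) (season : String) (nx ny : Int) : String :=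
  if ¬(0 ≤ nx ∧ nx < MAP_COLS * T ∧ 0 ≤ ny ∧ ny < MAP_ROWS * T) then "void"
  else if x - 1 ≤ nx ∧ nx ≤ x + 1 ∧ y - 1 ≤ ny ∧ ny ≤ y + 1 then "agent"
  else (PySem.List.pyGet? ((PySem.List.pyGet? ((List.lookup season map_data).getD []) ny).getD []) nx).getD ""

def get_first_person_alt (pos : Int × Int) (direction : String) (map_data : List (String × List (List String))) (season : String) (MAP_ROWS : Int) (MAP_COLS : Int) (TILE_SIZE : Int) : List (List String) :=
  let x := pos.1
  let y := pos.2
  let start_x := (PySem.Int.floordiv x TILE_SIZE - 1) * TILE_SIZE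
  let start_y := (PySem.Int.floordiv y TILE_SIZE - 1) * TILE_SIZE
  let n : Int := 3 * TILE_SIZE
  let src : Int → Int → Int × Int :=
    if direction = "east" then fun i j => (n - 1 - i, j)
    else if direction = "west" then fun i j => (i, n - 1 - j)
    else if direction = "south" then fun i j => (n - 1 - j, n - 1 - i)
    else fun i j => (j, i)
  (PySem.List.pyRange 0 n 1).map (fun i =>
    (PySem.List.pyRange 0 n 1).map (fun j =>
      pvCellB x y MAP_COLS MAP_ROWS TILE_SIZE map_data season
        (start_x + (src i j).1) (start_y + (src i j).2)))

-- ===== PRECONDITION & SPEC =====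
-- Pre_ excludes exactly the inputs on which the Python A raises: TILE_SIZE = 0 (ZeroDivisionError in
-- x // TILE_SIZE), and windows containing an in-bounds non-agent cell whose map_data[season][ny][nx]
-- lookup fails (KeyError / IndexError). Stated in closed form over the input: interval bounds of the
-- in-bounds part of the window, minus the 3x3 agent box, compared against the grid's shape.

-- largest in-bounds window column whose map cell is read on a row (none = no column is read);
-- agent_row: the row lies in the agent box, so columns x-1..x+1 are skipped
def pvMaxCol (x lo_x hi_x : Int) (agent_row : Bool) : Option Int :=
  if lo_x ≥ hi_x then none
  else if agent_row then
    if hi_x - 1 > x + 1 ∨ hi_x - 1 < x - 1 then some (hi_x - 1)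
    else if lo_x ≤ x - 2 then some (x - 2)
    else none
  else some (hi_x - 1)

-- every map cell the window reads exists: needed row indices are < grid length (c1) and each
-- needed grid row is long enough for its largest needed column (c2)
def pvPreOk (pos : Int × Int) (map_data : List (String × List (List String))) (season : String) (MAP_ROWS : Int) (MAP_COLS : Int) (TILE_SIZE : Int) : Bool :=
  let T := TILE_SIZE
  let x := pos.1
  let y := pos.2
  let lo_x := max ((PySem.Int.floordiv x T - 1) * T) 0
  let hi_x := min ((PySem.Int.floordiv x T + 2) * T) (MAP_COLS * T)
  let lo_y := max ((PySem.Int.floordiv y T - 1) * T) 0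
  let hi_y := min ((PySem.Int.floordiv y T + 2) * T) (MAP_ROWS * T)
  let g := (List.lookup season map_data).getD []
  let L : Int := (g.length : Int)
  let start := max lo_y L
  let c1 : Bool := decide (hi_y ≤ start) || decide (lo_x ≥ hi_x) ||
    (decide (y - 1 ≤ start ∧ hi_y ≤ y + 2) && (pvMaxCol x lo_x hi_x true).isNone)
  let c2 : Bool := g.zipIdx.all (fun rk =>
    let k : Int := (rk.2 : Int)
    if lo_y ≤ k ∧ k < hi_y then
      match pvMaxCol x lo_x hi_x (decide (y - 1 ≤ k ∧ k ≤ y + 1)) with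
      | none => true
      | some c => decide (c < (rk.1.length : Int))
    else true
  )
  c1 && c2

def Pre_get_first_person (pos : Int × Int) (direction : String) (map_data : List (String × List (List String))) (season : String) (MAP_ROWS : Int) (MAP_COLS : Int) (TILE_SIZE : Int) : Prop :=
  TILE_SIZE ≠ 0 ∧ pvPreOk pos map_data season MAP_ROWS MAP_COLS TILE_SIZE = true
instance (pos : Int × Int) (direction : String) (map_data : List (String × List (List String))) (season : String) (MAP_ROWS : Int) (MAP_COLS : Int) (TILE_SIZE : Int) : Decidable (Pre_get_first_person pos direction map_data season MAP_ROWS MAP_COLS TILE_SIZE) := by unfold Pre_get_first_person; infer_instance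

def pvWitness_get_first_person : (Int × Int) × String × (List (String × List (List String))) × String × Int × Int × Int :=
  ((1, 1), "east", [("summer", [["g", "g", "g"], ["g", "g", "g"], ["g", "g", "g"]])], "summer", 3, 3, 1)

def Spec_get_first_person (pos : Int × Int) (direction : String) (map_data : List (String × List (List String))) (season : String) (MAP_ROWS : Int) (MAP_COLS : Int) (TILE_SIZE : Int) (out : List (List String)) : Prop := out = get_first_person_alt pos direction map_data season MAP_ROWS MAP_COLS TILE_SIZE
instance (pos : Int × Int) (direction : String) (map_data : List (String × List (List String))) (season : String) (MAP_ROWS : Int) (MAP_COLS : Int) (TILE_SIZE : Int) (out : List (List String)) : Decidable (Spec_get_first_person pos direction map_data season MAP_ROWS MAP_COLS TILE_SIZE out) := by unfold Spec_get_first_person; infer_instance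

-- ===== CLAIM (what is proved, stated in full; the proofs are below) =====
def Claim_equal_get_first_person : Prop := ∀ (pos : Int × Int) (direction : String) (map_data : List (String × List (List String))) (season : String) (MAP_ROWS : Int) (MAP_COLS : Int) (TILE_SIZE : Int), Dom_get_first_person pos direction map_data season MAP_ROWS MAP_COLS TILE_SIZE → Pre_get_first_person pos direction map_data season MAP_ROWS MAP_COLS TILE_SIZE → Spec_get_first_person pos direction map_data season MAP_ROWS MAP_COLS TILE_SIZE (get_first_person pos direction map_data season MAP_ROWS MAP_COLS TILE_SIZE)

-- ===== LEMMAS AND PROOFS =====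

-- reversing a map over List.range flips the index
theorem pv_map_range_reverse {α : Type} (f : ℕ → α) (n : ℕ) :
    ((List.range n).map f).reverse = (List.range n).map (fun k => f (n - 1 - k)) := by
  induction n generalizing f with
  | zero => simp
  | succ n ih =>
    calc ((List.range (n + 1)).map f).reverse
        = f n :: ((List.range n).map f).reverse := by rw [List.range_succ]; simp
      _ = f n :: (List.range n).map (fun k => f (n - 1 - k)) := by rw [ih]
      _ = (List.range (n + 1)).map (fun k => f (n + 1 - 1 - k)) := by
          rw [List.range_succ_eq_map, List.map_cons, List.map_map]
          refine congrArg₂ _ (by norm_num) ?_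
          refine (List.map_congr_left (fun k _ => ?_)).symm
          simp only [Function.comp_def]
          congr 1
          omega

-- pvZipT of a rectangular range-indexed grid is its transpose
theorem pv_zipT_map_range (f : ℕ → ℕ → String) (n m : ℕ) (h : m = 0 → n = 0) :
    pvZipT ((List.range m).map (fun j => (List.range n).map (fun i => f i j)))
      = (List.range n).map (fun i => (List.range m).map (fun j => f i j)) := by
  induction n generalizing f with
  | zero =>
    rw [pvZipT.eq_def]
    rcases Nat.eq_zero_or_pos m with hm | hm
    · subst hm; simp
    · rw [dif_pos]
      · simp
      · right
        simp only [List.any_eq_true, List.mem_map]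
        exact ⟨[], ⟨0, by simp [List.mem_range]; omega⟩, by simp⟩
  | succ n ih =>
    have hm : 0 < m := by
      by_contra hc
      have hm0 : m = 0 := by omega
      exact Nat.succ_ne_zero n (h hm0)
    rw [pvZipT.eq_def, dif_neg]
    · have hrow : ∀ j : ℕ, (List.range (n + 1)).map (fun i => f i j)
          = f 0 j :: (List.range n).map (fun i => f (i + 1) j) := by
        intro j
        rw [List.range_succ_eq_map, List.map_cons, List.map_map]
        rfl
      have hheads : (((List.range m).map (fun j => (List.range (n + 1)).map (fun i => f i j))).map
          (fun r => r.headD "")) = (List.range m).map (fun j => f 0 j) := by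
        rw [List.map_map]
        refine List.map_congr_left (fun j _ => ?_)
        simp [hrow j]
      have htails : (((List.range m).map (fun j => (List.range (n + 1)).map (fun i => f i j))).map
          List.tail) = (List.range m).map (fun j => (List.range n).map (fun i => f (i + 1) j)) := by
        rw [List.map_map]
        refine List.map_congr_left (fun j _ => ?_)
        simp [hrow j]
      rw [hheads, htails, ih (fun i j => f (i + 1) j) (fun hm0 => absurd hm0 (by omega))]
      rw [List.range_succ_eq_map (n := n), List.map_cons, List.map_map]
      rfl
    · rintro (hc | hc)
      · rw [List.map_eq_nil_iff, List.range_eq_nil] at hc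
        omega
      · rw [List.any_eq_true] at hc
        obtain ⟨r, hr, hre⟩ := hc
        rw [List.mem_map] at hr
        obtain ⟨j, _, rfl⟩ := hr
        simp [List.range_succ_eq_map] at hre

-- the two classifiers agree (same three outcomes, branch order swapped)
theorem pv_cellA_eq_cellB (x y MC MR T : Int) (md : List (String × List (List String))) (s : String) (nx ny : Int) :
    pvCellA x y MC MR T md s nx ny = pvCellB x y MC MR T md s nx ny := by
  simp only [pvCellA, pvCellB, ite_not]

-- ===== VERDICT (by name: the statement is the Claim_ definition above) =====
theorem get_first_person_spec : Claim_equal_get_first_person := by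
  intro pos direction md season MR MC T _hdom _hpre
  unfold Spec_get_first_person
  simp only [get_first_person, get_first_person_alt, pv_cellA_eq_cellB,
    PySem.List.pyRange_one, sub_zero, zero_add, List.map_map, Function.comp_def]
  have e1 : ∀ a : Int, (a + 2) * T - (a - 1) * T = 3 * T := fun a => by ring
  simp only [e1]
  set m := (3 * T).toNat with hm
  have hz := pv_zipT_map_range (fun i j =>
    pvCellB pos.1 pos.2 MC MR T md season
      ((PySem.Int.floordiv pos.1 T - 1) * T + (i : Int))
      ((PySem.Int.floordiv pos.2 T - 1) * T + (j : Int))) m m (fun h => h)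
  split_ifs with h1 h2 h3
  · -- east
    simp only [hz, pv_map_range_reverse]
    refine List.map_congr_left (fun i hi => ?_)
    refine List.map_congr_left (fun j hj => ?_)
    simp only [List.mem_range] at hi hj
    have harg : ((m - 1 - i : ℕ) : Int) = 3 * T - 1 - (i : Int) := by omega
    rw [harg]
  · -- west
    have hz' := pv_zipT_map_range (fun i j =>
      pvCellB pos.1 pos.2 MC MR T md season
        ((PySem.Int.floordiv pos.1 T - 1) * T + (i : Int))
        ((PySem.Int.floordiv pos.2 T - 1) * T + ((m - 1 - j : ℕ) : Int))) m m (fun h => h)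
    simp only [pv_map_range_reverse, hz']
    refine List.map_congr_left (fun i hi => ?_)
    refine List.map_congr_left (fun j hj => ?_)
    simp only [List.mem_range] at hi hj
    have harg : ((m - 1 - j : ℕ) : Int) = 3 * T - 1 - (j : Int) := by omega
    rw [harg]
  · -- south
    simp only [pv_map_range_reverse, List.map_map, Function.comp_def]
    refine List.map_congr_left (fun i hi => ?_)
    refine List.map_congr_left (fun j hj => ?_)
    simp only [List.mem_range] at hi hj
    have ha1 : ((m - 1 - j : ℕ) : Int) = 3 * T - 1 - (j : Int) := by omega
    have ha2 : ((m - 1 - i : ℕ) : Int) = 3 * T - 1 - (i : Int) := by omega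
    rw [ha1, ha2]
  · -- north / any other direction
    rfl
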